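-- pv_equiv track=rewrite | github.com/RETR0-OS/DSA_Practice_Generators | heaps_practice.py | heap_to_sorted_array
-- ===== SOURCE A (Python) =====
-- def _cmp(a, b, is_min):
--     """Return True if a should be above b in this heap type."""
--     return a < b if is_min else a > b
--
-- def _sift_down(arr, i, end, is_min):
--     """
--     Sift element at 1-based index i downward within arr[1..end].
--     Returns list of swap steps: (idx_a, idx_b, snapshot).
--     """
--     steps = []
--     while True:
--         target = i
--         l, r   = 2 * i, 2 * i + 1
--         if l <= end and _cmp(arr[l], arr[target], is_min):
--             target = l
--         if r <= end and _cmp(arr[r], arr[target], is_min):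
--             target = r
--         if target == i:
--             break
--         arr[i], arr[target] = arr[target], arr[i]
--         steps.append((i, target, list(arr)))
--         i = target
--     return steps
--
-- def heap_to_sorted_array(arr, is_min):
--     """
--     Repeatedly extract the root from a 1-indexed heap to produce a sorted list.
--     Returns (sorted_list, steps) where each step = (extracted_val, heap_snapshot).
--     """
--     a   = list(arr)        # copy; a[0] = None
--     end = len(a) - 1
--     extracted = []
--     steps     = []
--     while end >= 1:
--         val      = a[1]
--         a[1], a[end] = a[end], a[1]
--         end     -= 1
--         _sift_down(a, 1, end, is_min)
--         extracted.append(val)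
--         # snapshot only the live portion [None, ...active elements...]
--         steps.append((val, [None] + a[1:end + 1]))
--     return extracted, steps
-- ===== SOURCE B (Python) =====
-- def _heapify(heap, i, is_min):
--     """Recursive sift-down in a 0-indexed list heap (children 2i+1, 2i+2)."""
--     n = len(heap)
--     t = i
--     l, r = 2 * i + 1, 2 * i + 2
--     if l < n and ((heap[l] < heap[t]) if is_min else (heap[l] > heap[t])):
--         t = l
--     if r < n and ((heap[r] < heap[t]) if is_min else (heap[r] > heap[t])):
--         t = r
--     if t != i:
--         heap[i], heap[t] = heap[t], heap[i]
--         _heapify(heap, t, is_min)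
--
-- def heap_to_sorted_array(arr, is_min):
--     # Work on a 0-indexed shrinking list of the live elements only: move the
--     # last element to the root, pop, and re-heapify recursively.
--     heap = list(arr[1:])
--     extracted, steps = [], []
--     while heap:
--         val = heap[0]
--         heap[0] = heap[-1]
--         heap.pop()
--         _heapify(heap, 0, is_min)
--         extracted.append(val)
--         steps.append((val, [None] + heap))
--     return extracted, steps
-- ===== Notes on version B (the rewrite author's own statement) =====
-- stated objective: simpler
-- what changed: The iterative sift-down over a fixed 1-indexed array with an explicit end pointer and internal swap-step list is replaced by a recursive CLRS-style heapify over a 0-indexed shrinking list that keeps only the live heap elements (root overwritten by the last element, which is popped), so there is no end pointer, no dead region and no step bookkeeping.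
import Mathlib
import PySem

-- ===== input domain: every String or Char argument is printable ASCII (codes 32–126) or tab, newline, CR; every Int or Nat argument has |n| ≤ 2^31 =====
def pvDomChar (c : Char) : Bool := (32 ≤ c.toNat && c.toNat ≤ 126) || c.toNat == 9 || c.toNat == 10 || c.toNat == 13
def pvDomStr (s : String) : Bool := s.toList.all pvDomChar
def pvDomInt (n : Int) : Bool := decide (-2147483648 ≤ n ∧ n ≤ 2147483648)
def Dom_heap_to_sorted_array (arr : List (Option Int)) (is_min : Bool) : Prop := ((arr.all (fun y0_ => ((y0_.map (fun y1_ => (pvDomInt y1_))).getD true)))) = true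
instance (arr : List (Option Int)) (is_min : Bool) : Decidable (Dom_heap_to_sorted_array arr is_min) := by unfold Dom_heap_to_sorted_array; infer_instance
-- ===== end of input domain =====

-- B rewrites the sift-down as a recursive CLRS-style heapify over a 0-indexed
-- SHRINKING list that holds only the live heap elements (root replaced by the
-- last element, which is then popped); objective: simpler (no end pointer, no
-- dead region, no internal swap-step bookkeeping). Mutation note: both Pythons
-- mutate only their private copies, the argument is never mutated.

-- ===== PORT A =====
-- `_cmp(a, b, is_min)`.  Cells are Option Int (a[0] = None); values compared are
-- unwrapped with getD 0 — exact under Pre_ (all compared cells are `some`, Python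
-- raises TypeError on None comparisons, which Pre_ excludes).
def pvCmp (x y : Option Int) (is_min : Bool) : Bool :=
  if is_min then decide (x.getD 0 < y.getD 0) else decide (x.getD 0 > y.getD 0)

-- `xs[i], xs[j] = xs[j], xs[i]` (indices are in range at every use site).
def pvSwap (a : List (Option Int)) (i j : Nat) : List (Option Int) :=
  (a.set i (a.getD j none)).set j (a.getD i none)

-- the `target` computed by one pass of A's while-loop body (1-indexed, children 2i, 2i+1)
def targA (a : List (Option Int)) (i fin : Nat) (is_min : Bool) : Nat :=
  let l := 2 * i
  let r := 2 * i + 1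
  let t1 := if l ≤ fin ∧ pvCmp (a.getD l none) (a.getD i none) is_min = true then l else i
  if r ≤ fin ∧ pvCmp (a.getD r none) (a.getD t1 none) is_min = true then r else t1

-- `_sift_down`: the while-loop as a structural recursion over the same state
-- (the Nat fuel only makes the loop total; fin + 1 bounds the number of iterations,
-- since the 1-based index strictly increases and stays ≤ fin)
def siftAGo : Nat → List (Option Int) → Nat → Nat → Bool →
    List (Nat × Nat × List (Option Int)) →
    List (Option Int) × List (Nat × Nat × List (Option Int))
  | 0, a, _, _, _, steps => (a, steps)
  | fuel + 1, a, i, fin, is_min, steps =>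
    let t := targA a i fin is_min
    if t = i then (a, steps)
    else siftAGo fuel (pvSwap a i t) t fin is_min (steps ++ [(i, t, pvSwap a i t)])

def siftA (a : List (Option Int)) (i fin : Nat) (is_min : Bool)
    (steps : List (Nat × Nat × List (Option Int))) :
    List (Option Int) × List (Nat × Nat × List (Option Int)) :=
  siftAGo (fin + 1) a i fin is_min steps

-- the `while end >= 1` loop of heap_to_sorted_array, with its accumulators; the
-- loop variable `end` decreases by one per iteration, so the recursion is on it
-- (the snapshot slice a[1:end+1] is (a.drop 1).take end — both bounds are nonnegative)
def loopA : List (Option Int) → Nat → Bool → List Int → List (Int × List (Option Int)) →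
    List Int × List (Int × List (Option Int))
  | _, 0, _, ex, st => (ex, st)
  | a, fin + 1, is_min, ex, st =>
    let val := a.getD 1 none
    let a1 := pvSwap a 1 (fin + 1)
    let a2 := (siftA a1 1 fin is_min []).1
    loopA a2 fin is_min (ex ++ [val.getD 0])
      (st ++ [(val.getD 0, none :: (a2.drop 1).take fin)])

def heap_to_sorted_array (arr : List (Option Int)) (is_min : Bool) :
    List Int × (List (Int × List (Option Int))) :=
  loopA arr (arr.length - 1) is_min [] []

-- ===== PORT B =====
-- `_heapify`'s target among i and its children (0-indexed, children 2i+1, 2i+2)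
def targB (h : List (Option Int)) (i : Nat) (is_min : Bool) : Nat :=
  let n := h.length
  let l := 2 * i + 1
  let r := 2 * i + 2
  let t1 := if l < n ∧ pvCmp (h.getD l none) (h.getD i none) is_min = true then l else i
  if r < n ∧ pvCmp (h.getD r none) (h.getD t1 none) is_min = true then r else t1

-- `_heapify`: recursive sift-down on the live list (fuel only makes it total;
-- h.length + 1 bounds the recursion depth, since i strictly increases below h.length)
def heapifyBGo : Nat → List (Option Int) → Nat → Bool → List (Option Int)
  | 0, h, _, _ => h
  | fuel + 1, h, i, is_min =>
    let t := targB h i is_min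
    if t = i then h else heapifyBGo fuel (pvSwap h i t) t is_min

def heapifyB (h : List (Option Int)) (i : Nat) (is_min : Bool) : List (Option Int) :=
  heapifyBGo (h.length + 1) h i is_min

-- the `while heap:` loop: pop-and-reheapify on the shrinking live list
-- (the list loses one element per iteration, so its length is the fuel)
def extractBGo : Nat → List (Option Int) → Bool → List Int → List (Int × List (Option Int)) →
    List Int × List (Int × List (Option Int))
  | 0, _, _, ex, st => (ex, st)
  | fuel + 1, heap, is_min, ex, st =>
    if heap = [] then (ex, st)
    else
      let val := heap.headD none
      let h1 := (heap.set 0 (heap.getLastD none)).dropLast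
      let h2 := heapifyB h1 0 is_min
      extractBGo fuel h2 is_min (ex ++ [val.getD 0]) (st ++ [(val.getD 0, none :: h2)])

def extractB (heap : List (Option Int)) (is_min : Bool)
    (ex : List Int) (st : List (Int × List (Option Int))) :
    List Int × List (Int × List (Option Int)) :=
  extractBGo heap.length heap is_min ex st

def heap_to_sorted_array_alt (arr : List (Option Int)) (is_min : Bool) :
    List Int × (List (Int × List (Option Int))) :=
  extractB (arr.drop 1) is_min [] []

-- ===== PRECONDITION & SPEC =====
-- Pre_ excludes arrays with a None among the heap elements (positions ≥ 1): on those
-- Python A either raises TypeError (None compared with an int) or puts None into the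
-- extracted list, which is then not a list of ints (outside the declared return type).
def Pre_heap_to_sorted_array (arr : List (Option Int)) (is_min : Bool) : Prop :=
  ∀ x ∈ arr.drop 1, x.isSome = true
instance (arr : List (Option Int)) (is_min : Bool) : Decidable (Pre_heap_to_sorted_array arr is_min) := by
  unfold Pre_heap_to_sorted_array; infer_instance

def pvWitness_heap_to_sorted_array : List (Option Int) × Bool := ([none, some 3, some 1, some 2], true)

def Spec_heap_to_sorted_array (arr : List (Option Int)) (is_min : Bool) (out : List Int × (List (Int × List (Option Int)))) : Prop := out = heap_to_sorted_array_alt arr is_min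
instance (arr : List (Option Int)) (is_min : Bool) (out : List Int × (List (Int × List (Option Int)))) : Decidable (Spec_heap_to_sorted_array arr is_min out) := by unfold Spec_heap_to_sorted_array; infer_instance

-- ===== CLAIM (what is proved, stated in full; the proofs are below) =====
def Claim_equal_heap_to_sorted_array : Prop := ∀ (arr : List (Option Int)) (is_min : Bool), Dom_heap_to_sorted_array arr is_min → Pre_heap_to_sorted_array arr is_min → Spec_heap_to_sorted_array arr is_min (heap_to_sorted_array arr is_min)

-- ===== LEMMAS AND PROOFS =====

theorem targA_ne (a : List (Option Int)) (i fin : Nat) (m : Bool)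
    (h : targA a i fin m ≠ i) : i < targA a i fin m ∧ targA a i fin m ≤ fin := by
  unfold targA at *
  dsimp only at *
  split_ifs at * <;> omega



theorem pvSwap_length' (a : List (Option Int)) (i j : Nat) :
    (pvSwap a i j).length = a.length := by simp [pvSwap]

theorem targB_ne (h : List (Option Int)) (i : Nat) (m : Bool)
    (hne : targB h i m ≠ i) : i < targB h i m ∧ targB h i m < h.length := by
  unfold targB at *
  dsimp only at *
  split_ifs at * <;> omega

-- the live window of A's array corresponds to B's shrinking heap
theorem live_length (a heap : List (Option Int)) (fin : Nat)
    (hh : heap = (a.drop 1).take fin) (hl : fin + 1 ≤ a.length) :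
    heap.length = fin := by
  subst hh; simp; omega

theorem live_getD (a heap : List (Option Int)) (fin : Nat)
    (hh : heap = (a.drop 1).take fin) (hl : fin + 1 ≤ a.length)
    (j : Nat) (hj : j < fin) :
    heap.getD j none = a.getD (j + 1) none := by
  subst hh
  rw [List.getD_eq_getElem?_getD, List.getD_eq_getElem?_getD,
    List.getElem?_take_of_lt hj, List.getElem?_drop]
  ring_nf

theorem targ_corr (a heap : List (Option Int)) (fin i : Nat) (m : Bool)
    (hi : 1 ≤ i) (hh : heap = (a.drop 1).take fin) (hl : fin + 1 ≤ a.length) :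
    targA a i fin m = targB heap (i - 1) m + 1 := by
  have hlen := live_length a heap fin hh hl
  have ei : i ≤ fin → heap.getD (i - 1) none = a.getD i none := fun h => by
    rw [live_getD a heap fin hh hl _ (by omega)]; congr 1; omega
  have eL : 2 * i ≤ fin → heap.getD (2 * (i - 1) + 1) none = a.getD (2 * i) none := fun h => by
    rw [live_getD a heap fin hh hl _ (by omega)]; congr 1; omega
  have eR : 2 * i + 1 ≤ fin → heap.getD (2 * (i - 1) + 2) none = a.getD (2 * i + 1) none := fun h => by
    rw [live_getD a heap fin hh hl _ (by omega)]; congr 1; omega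
  unfold targA targB
  dsimp only
  simp only [hlen]
  by_cases hL : 2 * i ≤ fin
  · rw [eL hL, ei (by omega)]
    by_cases hc1 : pvCmp (a.getD (2 * i) none) (a.getD i none) m = true
    · have hA1 : (if 2 * i ≤ fin ∧ pvCmp (a.getD (2 * i) none) (a.getD i none) m = true then 2 * i else i) = 2 * i := if_pos ⟨hL, hc1⟩
      have hB1 : (if 2 * (i - 1) + 1 < fin ∧ pvCmp (a.getD (2 * i) none) (a.getD i none) m = true then 2 * (i - 1) + 1 else i - 1) = 2 * (i - 1) + 1 := if_pos ⟨by omega, hc1⟩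
      rw [hA1, hB1, eL hL]
      by_cases hR : 2 * i + 1 ≤ fin
      · rw [eR hR]
        by_cases hc2 : pvCmp (a.getD (2 * i + 1) none) (a.getD (2 * i) none) m = true
        · have hA2 : (if 2 * i + 1 ≤ fin ∧ pvCmp (a.getD (2 * i + 1) none) (a.getD (2 * i) none) m = true then 2 * i + 1 else 2 * i) = 2 * i + 1 := if_pos ⟨hR, hc2⟩
          have hB2 : (if 2 * (i - 1) + 2 < fin ∧ pvCmp (a.getD (2 * i + 1) none) (a.getD (2 * i) none) m = true then 2 * (i - 1) + 2 else 2 * (i - 1) + 1) = 2 * (i - 1) + 2 := if_pos ⟨by omega, hc2⟩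
          rw [hA2, hB2]; omega
        · have hA2 : (if 2 * i + 1 ≤ fin ∧ pvCmp (a.getD (2 * i + 1) none) (a.getD (2 * i) none) m = true then 2 * i + 1 else 2 * i) = 2 * i := if_neg (fun hcon => hc2 hcon.2)
          have hB2 : (if 2 * (i - 1) + 2 < fin ∧ pvCmp (a.getD (2 * i + 1) none) (a.getD (2 * i) none) m = true then 2 * (i - 1) + 2 else 2 * (i - 1) + 1) = 2 * (i - 1) + 1 := if_neg (fun hcon => hc2 hcon.2)
          rw [hA2, hB2]; omega
      · have hA2 : (if 2 * i + 1 ≤ fin ∧ pvCmp (a.getD (2 * i + 1) none) (a.getD (2 * i) none) m = true then 2 * i + 1 else 2 * i) = 2 * i := if_neg (fun hcon => hR hcon.1)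
        have hB2 : (if 2 * (i - 1) + 2 < fin ∧ pvCmp (heap.getD (2 * (i - 1) + 2) none) (a.getD (2 * i) none) m = true then 2 * (i - 1) + 2 else 2 * (i - 1) + 1) = 2 * (i - 1) + 1 := if_neg (fun hcon => absurd hcon.1 (by omega))
        rw [hA2, hB2]; omega
    · have hA1 : (if 2 * i ≤ fin ∧ pvCmp (a.getD (2 * i) none) (a.getD i none) m = true then 2 * i else i) = i := if_neg (fun hcon => hc1 hcon.2)
      have hB1 : (if 2 * (i - 1) + 1 < fin ∧ pvCmp (a.getD (2 * i) none) (a.getD i none) m = true then 2 * (i - 1) + 1 else i - 1) = i - 1 := if_neg (fun hcon => hc1 hcon.2)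
      rw [hA1, hB1, ei (by omega)]
      by_cases hR : 2 * i + 1 ≤ fin
      · rw [eR hR]
        by_cases hc2 : pvCmp (a.getD (2 * i + 1) none) (a.getD i none) m = true
        · have hA2 : (if 2 * i + 1 ≤ fin ∧ pvCmp (a.getD (2 * i + 1) none) (a.getD i none) m = true then 2 * i + 1 else i) = 2 * i + 1 := if_pos ⟨hR, hc2⟩
          have hB2 : (if 2 * (i - 1) + 2 < fin ∧ pvCmp (a.getD (2 * i + 1) none) (a.getD i none) m = true then 2 * (i - 1) + 2 else i - 1) = 2 * (i - 1) + 2 := if_pos ⟨by omega, hc2⟩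
          rw [hA2, hB2]; omega
        · have hA2 : (if 2 * i + 1 ≤ fin ∧ pvCmp (a.getD (2 * i + 1) none) (a.getD i none) m = true then 2 * i + 1 else i) = i := if_neg (fun hcon => hc2 hcon.2)
          have hB2 : (if 2 * (i - 1) + 2 < fin ∧ pvCmp (a.getD (2 * i + 1) none) (a.getD i none) m = true then 2 * (i - 1) + 2 else i - 1) = i - 1 := if_neg (fun hcon => hc2 hcon.2)
          rw [hA2, hB2]; omega
      · have hA2 : (if 2 * i + 1 ≤ fin ∧ pvCmp (a.getD (2 * i + 1) none) (a.getD i none) m = true then 2 * i + 1 else i) = i := if_neg (fun hcon => hR hcon.1)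
        have hB2 : (if 2 * (i - 1) + 2 < fin ∧ pvCmp (heap.getD (2 * (i - 1) + 2) none) (a.getD i none) m = true then 2 * (i - 1) + 2 else i - 1) = i - 1 := if_neg (fun hcon => absurd hcon.1 (by omega))
        rw [hA2, hB2]; omega
  · have hA1 : (if 2 * i ≤ fin ∧ pvCmp (a.getD (2 * i) none) (a.getD i none) m = true then 2 * i else i) = i := if_neg (fun hcon => hL hcon.1)
    have hB1 : (if 2 * (i - 1) + 1 < fin ∧ pvCmp (heap.getD (2 * (i - 1) + 1) none) (heap.getD (i - 1) none) m = true then 2 * (i - 1) + 1 else i - 1) = i - 1 := if_neg (fun hcon => absurd hcon.1 (by omega))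
    rw [hA1, hB1]
    have hA2 : (if 2 * i + 1 ≤ fin ∧ pvCmp (a.getD (2 * i + 1) none) (a.getD i none) m = true then 2 * i + 1 else i) = i := if_neg (fun hcon => absurd hcon.1 (by omega))
    have hB2 : (if 2 * (i - 1) + 2 < fin ∧ pvCmp (heap.getD (2 * (i - 1) + 2) none) (heap.getD (i - 1) none) m = true then 2 * (i - 1) + 2 else i - 1) = i - 1 := if_neg (fun hcon => absurd hcon.1 (by omega))
    rw [hA2, hB2]; omega

theorem swap_corr (a heap : List (Option Int)) (fin i j : Nat) (m : Bool)
    (hi : 1 ≤ i) (hif : i ≤ fin) (hj : 1 ≤ j) (hjf : j ≤ fin)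
    (hh : heap = (a.drop 1).take fin) (hl : fin + 1 ≤ a.length) :
    pvSwap heap (i - 1) (j - 1) = ((pvSwap a i j).drop 1).take fin := by
  subst hh
  have e1 : ((a.drop 1).take fin).getD (j - 1) none = a.getD j none := by
    rw [live_getD a _ fin rfl hl _ (by omega)]; congr 1; omega
  have e2 : ((a.drop 1).take fin).getD (i - 1) none = a.getD i none := by
    rw [live_getD a _ fin rfl hl _ (by omega)]; congr 1; omega
  apply List.ext_getElem
  · simp only [pvSwap, List.length_set, List.length_take, List.length_drop]
  · intro k hk1 hk2
    have hk : k < fin := by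
      simp only [pvSwap, List.length_set, List.length_take, List.length_drop] at hk1
      omega
    simp only [pvSwap, e1, e2, List.getElem_set, List.getElem_take, List.getElem_drop]
    split_ifs <;> first
      | rfl
      | omega

theorem sift_corr : ∀ (fa fb : Nat) (a heap : List (Option Int)) (fin i : Nat) (m : Bool)
    (s : List (Nat × Nat × List (Option Int))),
    fin + 1 - i ≤ fa → fin + 1 - i ≤ fb → 1 ≤ i →
    heap = (a.drop 1).take fin → fin + 1 ≤ a.length →
    heapifyBGo fb heap (i - 1) m = (((siftAGo fa a i fin m s).1).drop 1).take fin ∧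
      (siftAGo fa a i fin m s).1.length = a.length := by
  intro fa
  induction fa with
  | zero =>
    intro fb a heap fin i m s hka hkb hi hh hl
    have hlen := live_length a heap fin hh hl
    cases fb with
    | zero => exact ⟨hh, by trivial⟩
    | succ nb =>
      have htB : targB heap (i - 1) m = i - 1 := by
        by_contra hne
        have := targB_ne heap (i - 1) m hne
        omega
      simp only [heapifyBGo, siftAGo]
      rw [htB, if_pos (Eq.refl (i - 1))]
      exact ⟨hh, trivial⟩
  | succ na ih =>
    intro fb a heap fin i m s hka hkb hi hh hl
    have htc := targ_corr a heap fin i m hi hh hl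
    cases fb with
    | zero =>
      have ht : targA a i fin m = i := by
        by_contra hne
        have := targA_ne a i fin m hne
        omega
      simp only [heapifyBGo, siftAGo]
      rw [if_pos ht]
      exact ⟨hh, by trivial⟩
    | succ nb =>
      simp only [heapifyBGo, siftAGo]
      by_cases ht : targA a i fin m = i
      · have htB : targB heap (i - 1) m = i - 1 := by omega
        rw [if_pos ht, if_pos htB]
        exact ⟨hh, by trivial⟩
      · have hbnd := targA_ne a i fin m ht
        have htB : ¬ targB heap (i - 1) m = i - 1 := by omega
        rw [if_neg ht, if_neg htB]
        have hBval : targB heap (i - 1) m = targA a i fin m - 1 := by omega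
        rw [hBval]
        have hrec := ih nb (pvSwap a i (targA a i fin m))
          (pvSwap heap (i - 1) (targA a i fin m - 1)) fin (targA a i fin m) m
          (s ++ [(i, targA a i fin m, pvSwap a i (targA a i fin m))])
          (by omega) (by omega) (by omega)
          (by
            rw [swap_corr a heap fin i (targA a i fin m) m hi (by omega) (by omega) (by omega) hh hl])
          (by rw [pvSwap_length']; exact hl)
        exact ⟨hrec.1, by rw [hrec.2, pvSwap_length']⟩

theorem pop_corr (a heap : List (Option Int)) (fin : Nat)
    (hh : heap = (a.drop 1).take fin) (hl : fin + 1 ≤ a.length) (hf : 1 ≤ fin) :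
    (heap.set 0 (heap.getLastD none)).dropLast = ((pvSwap a 1 fin).drop 1).take (fin - 1) := by
  have hlen := live_length a heap fin hh hl
  have hlast : heap.getLastD none = a.getD fin none := by
    have h1 := live_getD a heap fin hh hl (fin - 1) (by omega)
    have e : fin - 1 + 1 = fin := by omega
    rw [e] at h1
    rw [← h1, List.getLastD_eq_getLast?, List.getLast?_eq_getElem?,
      List.getD_eq_getElem?_getD, hlen]
  subst hh
  apply List.ext_getElem
  · simp only [List.length_dropLast, List.length_set, pvSwap, List.length_take,
      List.length_drop]
    omega
  · intro k hk1 hk2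
    have hk : k < fin - 1 := by
      simp only [List.length_dropLast, List.length_set, List.length_take,
        List.length_drop] at hk1
      omega
    simp only [List.getElem_dropLast, List.getElem_set, pvSwap, List.getElem_take,
      List.getElem_drop]
    split_ifs <;> first
      | rfl
      | exact hlast
      | omega

theorem headD_eq_getD_zero (l : List (Option Int)) : l.headD none = l.getD 0 none := by
  cases l <;> rfl

theorem loop_corr : ∀ (fin : Nat) (a : List (Option Int)) (m : Bool)
    (ex : List Int) (st : List (Int × List (Option Int))),
    fin + 1 ≤ a.length →
    loopA a fin m ex st = extractB ((a.drop 1).take fin) m ex st := by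
  intro fin
  induction fin with
  | zero =>
    intro a m ex st hl
    simp [loopA, extractB, extractBGo]
  | succ n ih =>
    intro a m ex st hl
    have hlive : ((a.drop 1).take (n + 1)).length = n + 1 := live_length a _ (n + 1) rfl hl
    have hne : ((a.drop 1).take (n + 1)) ≠ [] := by
      intro hcon
      rw [hcon] at hlive
      simp at hlive
    rw [extractB, hlive]
    simp only [loopA, extractBGo, siftA]
    rw [if_neg hne]
    have hval : ((a.drop 1).take (n + 1)).headD none = a.getD 1 none := by
      rw [headD_eq_getD_zero]
      exact live_getD a _ (n + 1) rfl hl 0 (by omega)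
    have hpop := pop_corr a _ (n + 1) rfl hl (by omega)
    simp only [Nat.add_sub_cancel] at hpop
    rw [hval, hpop, heapifyB]
    have hlen1 : (((pvSwap a 1 (n + 1)).drop 1).take n).length = n :=
      live_length _ _ n rfl (by rw [pvSwap_length']; omega)
    rw [hlen1]
    have hsift := sift_corr (n + 1) (n + 1) (pvSwap a 1 (n + 1))
      (((pvSwap a 1 (n + 1)).drop 1).take n) n 1 m []
      (by omega) (by omega) (by omega) rfl (by rw [pvSwap_length']; omega)
    rw [show (1 : Nat) - 1 = 0 from rfl] at hsift
    rw [hsift.1]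
    have hl2 : n + 1 ≤ (siftAGo (n + 1) (pvSwap a 1 (n + 1)) 1 n m []).1.length := by
      rw [hsift.2, pvSwap_length']
      omega
    have hlen2 : (((siftAGo (n + 1) (pvSwap a 1 (n + 1)) 1 n m []).1.drop 1).take n).length = n :=
      live_length _ _ n rfl hl2
    simp only [extractB] at ih
    have hIH := ih ((siftAGo (n + 1) (pvSwap a 1 (n + 1)) 1 n m []).1) m
      (ex ++ [(a.getD 1 none).getD 0])
      (st ++ [((a.getD 1 none).getD 0,
        none :: ((siftAGo (n + 1) (pvSwap a 1 (n + 1)) 1 n m []).1.drop 1).take n)]) hl2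
    rw [hlen2] at hIH
    exact hIH

-- ===== VERDICT (by name: the statement is the Claim_ definition above) =====
theorem heap_to_sorted_array_spec : Claim_equal_heap_to_sorted_array := by
  intro arr is_min _ _
  unfold Spec_heap_to_sorted_array heap_to_sorted_array heap_to_sorted_array_alt
  cases arr with
  | nil => simp [loopA, extractB, extractBGo]
  | cons x xs =>
    rw [loop_corr _ _ _ _ _ (by simp)]
    simp
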